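-- pv_equiv track=rewrite | github.com/coder-saab001/MLPractical | Exp6-CollaborativeFiltering/abc.py | common_items
-- ===== SOURCE A (Python) =====
-- def common_items(user1_data, user2_data):
--     result = []
--     ht = {}
--     for (movie_id, rating) in user1_data.items():
--         ht.setdefault(movie_id, 0)
--         ht[movie_id] += 1
--     for (movie_id, rating) in user2_data.items():
--         ht.setdefault(movie_id, 0)
--         ht[movie_id] += 1
--     for (movie_id, count) in ht.items():
--         if count == 2:
--             result.append(movie_id)
--     return result
-- ===== SOURCE B (Python) =====
-- def common_items(user1_data, user2_data):
--     # One membership-filtered pass over user1's keys; no frequency table.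
--     return [movie_id for movie_id in user1_data if movie_id in user2_data]
-- ===== Notes on version B (the rewrite author's own statement) =====
-- stated objective: simpler
-- what changed: Drops A's three-loop count-then-filter histogram entirely: B is a single membership-filtered pass over user1's keys, preserving their order (constant-factor speedup: no intermediate dict is built).
import Mathlib
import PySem

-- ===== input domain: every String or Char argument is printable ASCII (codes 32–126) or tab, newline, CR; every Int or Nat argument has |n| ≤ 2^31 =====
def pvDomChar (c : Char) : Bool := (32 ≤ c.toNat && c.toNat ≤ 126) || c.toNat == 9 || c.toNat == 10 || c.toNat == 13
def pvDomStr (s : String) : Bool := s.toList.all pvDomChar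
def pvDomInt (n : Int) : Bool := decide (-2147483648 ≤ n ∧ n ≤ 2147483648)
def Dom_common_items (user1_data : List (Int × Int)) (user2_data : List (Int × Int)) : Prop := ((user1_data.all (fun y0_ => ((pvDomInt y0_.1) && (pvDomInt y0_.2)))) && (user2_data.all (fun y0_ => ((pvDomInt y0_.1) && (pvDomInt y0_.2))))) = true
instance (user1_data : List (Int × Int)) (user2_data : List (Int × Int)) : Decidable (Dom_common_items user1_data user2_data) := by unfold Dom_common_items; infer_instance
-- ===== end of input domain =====

-- B replaces A's three-loop count-then-filter histogram with one membership-filtered pass over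
-- user1's keys (same order, same values); objective: simpler.

-- ===== PORT A =====
-- dict parameters are association lists; as in Python, the dict they denote has unique keys
-- (PySem.Dict.ofList = insertion order, later value for a repeated key overwrites in place).
def common_items (user1_data : List (Int × Int)) (user2_data : List (Int × Int)) : List Int :=
  let d1 : PySem.Dict Int Int := PySem.Dict.ofList user1_data
  let d2 : PySem.Dict Int Int := PySem.Dict.ofList user2_data
  -- ht.setdefault(movie_id, 0); ht[movie_id] += 1  (the += is exact as modify: the key is present)
  let ht1 : PySem.Dict Int Int :=
    d1.items.foldl (fun ht p => (ht.setdefault p.1 0).modify p.1 0 (· + 1)) PySem.Dict.empty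
  let ht2 : PySem.Dict Int Int :=
    d2.items.foldl (fun ht p => (ht.setdefault p.1 0).modify p.1 0 (· + 1)) ht1
  ht2.items.foldl (fun result p => if p.2 == 2 then result ++ [p.1] else result) []

-- ===== PORT B =====
def common_items_alt (user1_data : List (Int × Int)) (user2_data : List (Int × Int)) : List Int :=
  let d1 : PySem.Dict Int Int := PySem.Dict.ofList user1_data
  let d2 : PySem.Dict Int Int := PySem.Dict.ofList user2_data
  d1.keys.filter (fun movie_id => d2.contains movie_id)

-- ===== PRECONDITION & SPEC =====
def Spec_common_items (user1_data : List (Int × Int)) (user2_data : List (Int × Int)) (out : List Int) : Prop := out = common_items_alt user1_data user2_data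
instance (user1_data : List (Int × Int)) (user2_data : List (Int × Int)) (out : List Int) : Decidable (Spec_common_items user1_data user2_data out) := by unfold Spec_common_items; infer_instance

-- ===== CLAIM (what is proved, stated in full; the proofs are below) =====
def Claim_equal_common_items : Prop := ∀ (user1_data : List (Int × Int)) (user2_data : List (Int × Int)), Dom_common_items user1_data user2_data → Spec_common_items user1_data user2_data (common_items user1_data user2_data)

-- ===== LEMMAS AND PROOFS =====

-- setdefault k 0 followed by modify k 0 (+1) is a single modify k 0 (+1)
theorem pv_setdefault_modify (d : PySem.Dict Int Int) (k : Int) :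
    (d.setdefault k 0).modify k 0 (· + 1) = d.modify k 0 (· + 1) := by
  by_cases h : d.contains k = true
  · rw [PySem.Dict.setdefault_of_contains d 0 h]
  · rw [PySem.Dict.setdefault_of_not_contains d 0 (by simpa using h)]
    simp [PySem.Dict.modify, PySem.Dict.insert_insert_self,
      PySem.Dict.getD_insert_self, PySem.Dict.getD_of_not_contains d 0 (by simpa using h)]

theorem pv_loop_eq (l : List (Int × Int)) (d : PySem.Dict Int Int) :
    l.foldl (fun ht p => (ht.setdefault p.1 0).modify p.1 0 (· + 1)) d
      = (l.map (·.1)).foldl (fun ht k => ht.modify k 0 (· + 1)) d := by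
  induction l generalizing d with
  | nil => rfl
  | cons p t ih =>
    rw [List.foldl_cons, List.map_cons, List.foldl_cons, pv_setdefault_modify]
    exact ih _

theorem pv_count_nodup {l : List Int} (h : l.Nodup) (a : Int) :
    l.count a = if a ∈ l then 1 else 0 := by
  by_cases hm : a ∈ l
  · simp [hm, List.count_eq_one_of_mem h hm]
  · simp [hm, List.count_eq_zero_of_not_mem hm]

-- ===== VERDICT (by name: the statement is the Claim_ definition above) =====
theorem common_items_spec : Claim_equal_common_items := by
  intro u1 u2 _
  show _ = _
  unfold common_items common_items_alt
  simp only []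
  set d1 : PySem.Dict Int Int := PySem.Dict.ofList u1 with hd1
  set d2 : PySem.Dict Int Int := PySem.Dict.ofList u2 with hd2
  have hn1 : d1.keys.Nodup := PySem.Dict.nodup_keys_ofList u1
  have hn2 : d2.keys.Nodup := PySem.Dict.nodup_keys_ofList u2
  rw [pv_loop_eq, pv_loop_eq]
  set ht2 : PySem.Dict Int Int :=
    (d2.items.map (·.1)).foldl (fun ht k => ht.modify k 0 (· + 1))
      ((d1.items.map (·.1)).foldl (fun ht k => ht.modify k 0 (· + 1)) PySem.Dict.empty) with hht2
  have hk1 : d1.items.map (·.1) = d1.keys := rfl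
  have hk2 : d2.items.map (·.1) = d2.keys := rfl
  have hgetD : ∀ v, ht2.getD v 0 = (if v ∈ d1.keys then (1:Int) else 0) + (if v ∈ d2.keys then 1 else 0) := by
    intro v
    rw [hht2, hk1, hk2, PySem.Dict.getD_foldl_modify_add_one, PySem.Dict.getD_foldl_modify_add_one]
    simp [pv_count_nodup hn1, pv_count_nodup hn2]
  have hkeys : ht2.keys = d1.keys ++ d2.keys.filter (fun k => !(PySem.Set.contains d1.keys k)) := by
    rw [hht2, hk1, hk2, PySem.Dict.keys_foldl_modify, PySem.Dict.keys_foldl_modify]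
    simp only [PySem.Dict.keys_empty]
    rw [PySem.Set.update_nil_left, PySem.Set.ofList_eq_self_of_nodup _ hn1,
      PySem.Set.update_eq_append_filter, PySem.Set.ofList_eq_self_of_nodup _ hn2]
  have hnkeys : ht2.keys.Nodup := by
    rw [hkeys]
    refine List.Nodup.append hn1 (hn2.filter _) ?_
    intro a ha hb
    have := List.of_mem_filter hb
    simp [PySem.Set.contains] at this
    exact this ha
  rw [PySem.Dict.items_eq_map_keys ht2 hnkeys 0]
  rw [PySem.List.foldl_append_if]
  simp only [List.nil_append, List.filter_map, List.map_map]
  rw [hkeys]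
  rw [List.filter_append]
  have h2 : (d2.keys.filter (fun k => !(PySem.Set.contains d1.keys k))).filter
      ((fun p => p.2 == 2) ∘ fun k => (k, ht2.getD k 0)) = [] := by
    rw [List.filter_filter]
    apply List.filter_eq_nil_iff.mpr
    intro k hk
    have hke : k ∈ d2.keys := hk
    simp only [Function.comp]
    rw [hgetD k]
    by_cases h1 : k ∈ d1.keys <;> simp [h1, hke, PySem.Set.contains] <;> omega
  rw [h2, List.append_nil]
  have h1 : d1.keys.filter ((fun p => p.2 == 2) ∘ fun k => (k, ht2.getD k 0))
      = d1.keys.filter (fun movie_id => d2.contains movie_id) := by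
    apply List.filter_congr
    intro k hk
    simp only [Function.comp]
    rw [hgetD k, PySem.Dict.contains_eq_decide_mem_keys]
    by_cases h2m : k ∈ d2.keys <;> simp [hk, h2m]
  rw [h1]
  have hmapid : (Prod.fst ∘ fun k => (k, ht2.getD k 0)) = id := rfl
  rw [hmapid, List.map_id]
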